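-- pv_equiv track=rewrite | github.com/radical-cybertools/radical.utils | src/radical/utils/algorithms.py | range_concurrency
-- ===== SOURCE A (Python) =====
-- def range_concurrency(ranges):
--     '''
--     given a set of *un*collapsed ranges, return a series which describes the
--     range-concurrency at any point.
--
--     Example:
--       Ranges:
--         [----]  [---------]             [--------]
--           [--------]         [-]      [------------]      [--]
--
--       Concurrency:
--         1 2  1  2  1      0  1 0      1 2        1 0      1  0
--
--     Returned is a sorted list of tuples where the first entry defines at what
--     range value the concurrency changed, and the second value defines to what
--     the concurrency count changed at that point.
--
--     You could consider the ranges to be of type `[time_start, time_end]`, and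
--     the return would be a list of `[timestamp, concurrency]`, if that helps --
--     but the algorithm does not make any assumption on the data type, really,
--     only that the values can be sorted.
--     '''
--
--     if not ranges:
--         return list()
--
--     START = 0
--     END   = 1
--
--     t = {0: 'start',
--          1: 'end  '}
--
--     for _range in ranges:
--         if _range[START] > _range[END]:
--             _range[START], _range[END] = _range[END], _range[START]
--
--     # we want to sort all range boundaries by value, but also want to remember
--     # if they were start or end
--     times  = list()
--     for idx in range(len(ranges)):
--         r = ranges[idx]
--         times.append([r[0], START])
--         times.append([r[1], END  ])
--
--     times.sort()
--
--     # go through the sorted list of times, and increase concurrency on `START`,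
--     # decrease it on `END`.  Make sure we add up all entries for the same value
--     # at once.
--
--     # return a sequence of [timestamp, concurrency] tuples
--     ret = list()
--
--     # check initial conditions
--     assert(times[0][0] >= 0    ), 'negative time %s'       % times[0]
--     assert(times[0][1] == START), 'inconsistent ranges %s' % ranges
--
--     last_time   = times[0][0]
--     concurrency = 1
--
--     # set zero marker
--     ret.append([last_time, 0])
--
--     # for all range boundaries:
--     #     if time changed:
--     #         store prervious tuple
--     #     if a range STARTed at this time, increase concurrency,
--     #     if a range ENDed   at this time, decrease concurrency,
--     # store trailing tuple
--
--     for time,mode in times[1:]: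
--         if time != last_time:
--             ret.append([last_time, concurrency])
--             last_time = time
--
--         if mode == START: concurrency += 1
--         else            : concurrency -= 1
--
--     ret.append([last_time, concurrency])
--
--     assert(concurrency == 0), \
--             'inconsistent range structure? %s : %s : %s' % (ranges, ret, times)
--
--     return ret
-- ===== SOURCE B (Python) =====
-- def range_concurrency(ranges):
--     # Same return value as the original; note both versions normalise each
--     # range in place (swap reversed [start, end] pairs), as A does.
--     if not ranges:
--         return list()
--
--     for r in ranges:
--         if r[0] > r[1]:
--             r[0], r[1] = r[1], r[0]
--
--     # net concurrency change at each boundary value: +1 per start, -1 per end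
--     bounds = []
--     for r in ranges:
--         bounds += [(r[0], 1), (r[1], -1)]
--
--     delta = {}
--     for t, d in bounds:
--         delta[t] = delta.get(t, 0) + d
--
--     vals = sorted(delta)
--     assert vals[0] >= 0, 'negative time %s' % vals[0]
--
--     out = [[vals[0], 0]]
--     c = 0
--     for v in vals:
--         c += delta[v]
--         out.append([v, c])
--     return out
-- ===== Notes on version B (the rewrite author's own statement) =====
-- stated objective: alternative
-- what changed: Instead of lexicographically sorting all 2n (time, start/end) boundary events and running a group-by scan that tracks last_time and a running concurrency, B aggregates the net concurrency change per boundary value into a dict (+1 per start, -1 per end) and emits a prefix-sum over the sorted distinct values.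
import Mathlib
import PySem

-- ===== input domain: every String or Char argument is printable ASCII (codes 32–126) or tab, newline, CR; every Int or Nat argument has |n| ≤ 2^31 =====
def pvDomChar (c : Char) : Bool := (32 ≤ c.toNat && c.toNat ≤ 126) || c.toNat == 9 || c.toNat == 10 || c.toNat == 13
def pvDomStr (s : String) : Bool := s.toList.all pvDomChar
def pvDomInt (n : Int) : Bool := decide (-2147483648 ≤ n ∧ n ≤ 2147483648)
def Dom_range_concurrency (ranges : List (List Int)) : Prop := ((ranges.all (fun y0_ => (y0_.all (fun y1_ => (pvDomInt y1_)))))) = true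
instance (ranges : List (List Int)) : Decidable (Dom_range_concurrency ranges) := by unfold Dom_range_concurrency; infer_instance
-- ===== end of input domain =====

-- B aggregates per-value concurrency deltas in a dict and prefix-sums them over the
-- sorted distinct boundary values, instead of A's lex-sort of all 2n boundary events
-- followed by a group-by scan.  Both Pythons normalise each range in place (the
-- start/end swap); the equivalence proved here is about the return value.

-- ===== PORT A =====
-- shared helper: the identical in-place swap loop body of both Pythons
def pySwap (r : List Int) : List Int :=
  if PySem.List.pyGetD r 0 0 > PySem.List.pyGetD r 1 0 then
    (r.set 0 (PySem.List.pyGetD r 1 0)).set 1 (PySem.List.pyGetD r 0 0)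
  else r

def range_concurrency (ranges : List (List Int)) : List (List Int) :=
  if ranges = [] then []
  else
    let rs := ranges.map pySwap
    let times := rs.foldl (fun acc r =>
      acc ++ [(PySem.List.pyGetD r 0 0, (0 : Int)), (PySem.List.pyGetD r 1 0, (1 : Int))]) []
    let ts := PySem.List.sorted2 times (·.1) (·.2) false
    match ts with
    | [] => []  -- unreachable: ranges ≠ [] gives ts ≠ []
    | (t0, _) :: rest =>
      let st := rest.foldl (fun (s : List (List Int) × Int × Int) (p : Int × Int) =>
        let rl := if p.1 ≠ s.2.1 then (s.1 ++ [[s.2.1, s.2.2]], p.1) else (s.1, s.2.1)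
        (rl.1, rl.2, if p.2 = 0 then s.2.2 + 1 else s.2.2 - 1)) ([[t0, 0]], t0, 1)
      st.1 ++ [[st.2.1, st.2.2]]

-- ===== PORT B =====
def range_concurrency_alt (ranges : List (List Int)) : List (List Int) :=
  if ranges = [] then []
  else
    let rs := ranges.map pySwap
    let bounds := rs.foldl (fun acc r =>
      acc ++ [(PySem.List.pyGetD r 0 0, (1 : Int)), (PySem.List.pyGetD r 1 0, (-1 : Int))]) []
    let delta := bounds.foldl (fun d p => d.insert p.1 (d.getD p.1 0 + p.2)) PySem.Dict.empty
    let vals := PySem.List.sorted delta.keys (fun x => x) false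
    match vals with
    | [] => []  -- unreachable: ranges ≠ [] gives vals ≠ []
    | v0 :: _ =>
      (vals.foldl (fun (s : List (List Int) × Int) (v : Int) =>
        (s.1 ++ [[v, s.2 + delta.getD v 0]], s.2 + delta.getD v 0)) ([[v0, 0]], 0)).1

-- ===== PRECONDITION & SPEC =====
-- Pre_ excludes exactly the inputs where the Python A raises: a range with fewer than
-- two entries (IndexError on _range[1]) and negative boundary values (AssertionError
-- 'negative time').  B raises on the same inputs.
def Pre_range_concurrency (ranges : List (List Int)) : Prop :=
  ∀ r ∈ ranges, 2 ≤ r.length ∧ 0 ≤ PySem.List.pyGetD r 0 0 ∧ 0 ≤ PySem.List.pyGetD r 1 0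
instance (ranges : List (List Int)) : Decidable (Pre_range_concurrency ranges) := by
  unfold Pre_range_concurrency; infer_instance

def pvWitness_range_concurrency : List (List Int) := [[0, 2], [3, 1]]

def Spec_range_concurrency (ranges : List (List Int)) (out : List (List Int)) : Prop := out = range_concurrency_alt ranges
instance (ranges : List (List Int)) (out : List (List Int)) : Decidable (Spec_range_concurrency ranges out) := by unfold Spec_range_concurrency; infer_instance

-- ===== CLAIM (what is proved, stated in full; the proofs are below) =====
def Claim_equal_range_concurrency : Prop := ∀ (ranges : List (List Int)), Dom_range_concurrency ranges → Pre_range_concurrency ranges → Spec_range_concurrency ranges (range_concurrency ranges)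

-- ===== LEMMAS AND PROOFS =====

-- proof-side vocabulary ------------------------------------------------------

/-- `+1` for a START event (mode 0), `-1` for an END event. -/
def dA (m : Int) : Int := if m = 0 then 1 else -1

/-- net concurrency among events with value `≤ v` (A's event list, mode 0/1). -/
def netA (ts : List (Int × Int)) (v : Int) : Int :=
  (ts.map (fun p => if p.1 ≤ v then dA p.2 else 0)).sum

/-- net concurrency change exactly at value `v` (B's signed boundary list). -/
def dlt (bs : List (Int × Int)) (v : Int) : Int :=
  (bs.map (fun p => if p.1 = v then p.2 else 0)).sum

/-- net concurrency among signed boundaries with value `≤ v`. -/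
def netLE (bs : List (Int × Int)) (v : Int) : Int :=
  (bs.map (fun p => if p.1 ≤ v then p.2 else 0)).sum

/-- recursive rendering of A's group-by scan. -/
def grouped : Int → Int → List (Int × Int) → List (List Int)
  | lt, c, [] => [[lt, c]]
  | lt, c, p :: rest =>
    if p.1 = lt then grouped lt (c + dA p.2) rest
    else [lt, c] :: grouped p.1 (c + dA p.2) rest

/-- recursive rendering of B's prefix-sum scan. -/
def scanOut (D : Int → Int) : List Int → Int → List (List Int)
  | [], _ => []
  | v :: vs, c => [v, c + D v] :: scanOut D vs (c + D v)

/-- weak lexicographic order on event pairs. -/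
def lexLE (p q : Int × Int) : Prop := p.1 < q.1 ∨ (p.1 = q.1 ∧ p.2 ≤ q.2)


-- the lexicographic 'before' test that sorted2 uses on (value, mode) pairs
def bfA (a b : Int × Int) : Bool :=
  decide (a.1 < b.1) || (!decide (b.1 < a.1) && decide (a.2 < b.2))

lemma sorted2_eq_foldl (xs : List (Int × Int)) :
    PySem.List.sorted2 xs (·.1) (·.2) false
      = xs.foldl (fun acc x => PySem.List.insertBy bfA x acc) [] := rfl

lemma lexLE_of_bfA_true {a b : Int × Int} (h : bfA a b = true) : lexLE a b := by
  simp [bfA, lexLE] at h ⊢; omega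

lemma lexLE_of_bfA_false {a b : Int × Int} (h : bfA a b = false) : lexLE b a := by
  simp [bfA, lexLE] at h ⊢; omega

lemma lexLE_trans {a b c : Int × Int} (h1 : lexLE a b) (h2 : lexLE b c) : lexLE a c := by
  simp [lexLE] at h1 h2 ⊢; omega

lemma pairwise_insertBy_lex (x : Int × Int) :
    ∀ ys, ys.Pairwise lexLE → (PySem.List.insertBy bfA x ys).Pairwise lexLE := by
  intro ys
  induction ys with
  | nil => intro _; simp [PySem.List.insertBy]
  | cons y ys ih =>
    intro h
    rw [List.pairwise_cons] at h
    show (if bfA x y then x :: y :: ys else y :: PySem.List.insertBy bfA x ys).Pairwise lexLE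
    by_cases hb : bfA x y = true
    · rw [if_pos hb]
      refine List.Pairwise.cons ?_ (List.Pairwise.cons h.1 h.2)
      intro z hz
      rcases List.mem_cons.mp hz with rfl | hz'
      · exact lexLE_of_bfA_true hb
      · exact lexLE_trans (lexLE_of_bfA_true hb) (h.1 z hz')
    · rw [if_neg hb]
      refine List.Pairwise.cons ?_ (ih h.2)
      intro z hz
      rcases (PySem.List.mem_insertBy bfA x z ys).mp hz with rfl | hz'
      · exact lexLE_of_bfA_false (by simpa using hb)
      · exact h.1 z hz'

lemma pairwise_foldl_insertBy (l : List (Int × Int)) :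
    ∀ acc, acc.Pairwise lexLE →
      (l.foldl (fun acc x => PySem.List.insertBy bfA x acc) acc).Pairwise lexLE := by
  induction l with
  | nil => intro acc h; simpa using h
  | cons x l ih => intro acc h; exact ih _ (pairwise_insertBy_lex x acc h)

lemma sorted2_pairwise_lex (xs : List (Int × Int)) :
    (PySem.List.sorted2 xs (·.1) (·.2) false).Pairwise lexLE := by
  rw [sorted2_eq_foldl]
  exact pairwise_foldl_insertBy xs [] (by simp)

-- dedup facts ----------------------------------------------------------------

lemma foldl_add_split (l : List Int) :
    ∀ s : List Int, ∃ t, l.foldl PySem.Set.add s = s ++ t ∧ t.Sublist l := by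
  induction l with
  | nil => intro s; exact ⟨[], by simp⟩
  | cons x l ih =>
    intro s
    by_cases hc : x ∈ s
    · obtain ⟨t, ht, hs⟩ := ih s
      refine ⟨t, ?_, hs.cons x⟩
      simpa [PySem.Set.add, hc] using ht
    · obtain ⟨t, ht, hs⟩ := ih (s ++ [x])
      refine ⟨x :: t, ?_, hs.cons₂ x⟩
      simpa [PySem.Set.add, hc] using ht

lemma dedup_sublist (l : List Int) : (PySem.List.dedup l).Sublist l := by
  obtain ⟨t, ht, hs⟩ := foldl_add_split l []
  have : PySem.List.dedup l = t := by
    simpa [PySem.List.dedup, PySem.Set.ofList] using ht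
  rw [this]; exact hs

lemma dedup_cons_split (x : Int) (l : List Int) :
    ∃ t, PySem.List.dedup (x :: l) = x :: t := by
  obtain ⟨t, ht, -⟩ := foldl_add_split l [x]
  exact ⟨t, by simpa [PySem.List.dedup, PySem.Set.ofList, PySem.Set.add] using ht⟩

lemma dedup_cons_self (x : Int) (l : List Int) :
    PySem.List.dedup (x :: x :: l) = PySem.List.dedup (x :: l) := by
  simp [PySem.List.dedup, PySem.Set.ofList, PySem.Set.add]

lemma foldl_add_cons_of_not_mem (l : List Int) :
    ∀ (s : List Int) (a : Int), a ∉ l →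
      l.foldl PySem.Set.add (a :: s) = a :: l.foldl PySem.Set.add s := by
  induction l with
  | nil => intro s a _; rfl
  | cons x l ih =>
    intro s a ha
    have hxa : ¬ (x = a) := fun h => ha (h ▸ List.mem_cons_self)
    have hstep : PySem.Set.add (a :: s) x = a :: PySem.Set.add s x := by
      simp only [PySem.Set.add]
      by_cases hm : x ∈ s
      · simp [hm, hxa]
      · simp [hm, hxa]
    calc (x :: l).foldl PySem.Set.add (a :: s)
        = l.foldl PySem.Set.add (PySem.Set.add (a :: s) x) := rfl
      _ = l.foldl PySem.Set.add (a :: PySem.Set.add s x) := by rw [hstep]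
      _ = a :: l.foldl PySem.Set.add (PySem.Set.add s x) :=
          ih _ a (fun h => ha (List.mem_cons_of_mem _ h))
      _ = a :: (x :: l).foldl PySem.Set.add s := rfl

lemma dedup_cons_of_not_mem {x : Int} {l : List Int} (h : x ∉ l) :
    PySem.List.dedup (x :: l) = x :: PySem.List.dedup l := by
  show PySem.Set.ofList (x :: l) = x :: PySem.Set.ofList l
  have : PySem.Set.ofList (x :: l) = l.foldl PySem.Set.add [x] := rfl
  rw [this]
  simpa using foldl_add_cons_of_not_mem l [] x h

-- A-side characterisation ----------------------------------------------------

lemma netA_cons (p : Int × Int) (ts : List (Int × Int)) (v : Int) :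
    netA (p :: ts) v = (if p.1 ≤ v then dA p.2 else 0) + netA ts v := by
  simp [netA]

lemma netA_zero {ts : List (Int × Int)} {v : Int} (h : ∀ p ∈ ts, ¬ p.1 ≤ v) :
    netA ts v = 0 := by
  apply List.sum_eq_zero
  intro x hx
  obtain ⟨p, hp, rfl⟩ := List.mem_map.mp hx
  simp [h p hp]

lemma A_loop (rest : List (Int × Int)) :
    ∀ (ret : List (List Int)) (lt c : Int),
      (rest.foldl (fun (s : List (List Int) × Int × Int) (p : Int × Int) =>
        let rl := if p.1 ≠ s.2.1 then (s.1 ++ [[s.2.1, s.2.2]], p.1) else (s.1, s.2.1)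
        (rl.1, rl.2, if p.2 = 0 then s.2.2 + 1 else s.2.2 - 1)) (ret, lt, c)).1
      ++ [[(rest.foldl (fun (s : List (List Int) × Int × Int) (p : Int × Int) =>
        let rl := if p.1 ≠ s.2.1 then (s.1 ++ [[s.2.1, s.2.2]], p.1) else (s.1, s.2.1)
        (rl.1, rl.2, if p.2 = 0 then s.2.2 + 1 else s.2.2 - 1)) (ret, lt, c)).2.1,
        (rest.foldl (fun (s : List (List Int) × Int × Int) (p : Int × Int) =>
        let rl := if p.1 ≠ s.2.1 then (s.1 ++ [[s.2.1, s.2.2]], p.1) else (s.1, s.2.1)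
        (rl.1, rl.2, if p.2 = 0 then s.2.2 + 1 else s.2.2 - 1)) (ret, lt, c)).2.2]]
      = ret ++ grouped lt c rest := by
  induction rest with
  | nil => intro ret lt c; simp [grouped]
  | cons p rest ih =>
    intro ret lt c
    have hcd : c + dA p.2 = if p.2 = 0 then c + 1 else c - 1 := by
      simp [dA]; split <;> omega
    by_cases h : p.1 = lt
    · simp only [List.foldl_cons, h, ne_eq, not_true_eq_false, if_false, grouped, reduceIte]
      rw [hcd]
      exact ih ret lt (if p.2 = 0 then c + 1 else c - 1)
    · simp only [List.foldl_cons, ne_eq, h, not_false_eq_true, if_true, grouped, reduceIte]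
      rw [hcd]
      have := ih (ret ++ [[lt, c]]) p.1 (if p.2 = 0 then c + 1 else c - 1)
      simp only at this ⊢
      rw [this]
      simp

lemma grouped_eq (ts : List (Int × Int)) :
    ∀ (lt c : Int),
      ts.Pairwise (fun p q => p.1 ≤ q.1) → (∀ p ∈ ts, lt ≤ p.1) →
      grouped lt c ts
        = (PySem.List.dedup (lt :: ts.map (·.1))).map (fun u => [u, c + netA ts u]) := by
  induction ts with
  | nil => intro lt c _ _; simp [grouped, netA, PySem.List.dedup, PySem.Set.ofList, PySem.Set.add]
  | cons p ts ih =>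
    intro lt c hpw hge
    rw [List.pairwise_cons] at hpw
    by_cases h : p.1 = lt
    · rw [show grouped lt c (p :: ts) = grouped lt (c + dA p.2) ts by
        simp [grouped, h]]
      have hged : ∀ q ∈ ts, lt ≤ q.1 := fun q hq => hge q (List.mem_cons_of_mem _ hq)
      rw [ih lt (c + dA p.2) hpw.2 hged]
      have hdd : PySem.List.dedup (lt :: (p :: ts).map (·.1))
          = PySem.List.dedup (lt :: ts.map (·.1)) := by
        simp only [List.map_cons, h]
        exact dedup_cons_self lt (ts.map (·.1))
      rw [hdd]
      apply List.map_congr_left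
      intro u hu
      have hltu : lt ≤ u := by
        rcases List.mem_cons.mp ((PySem.List.mem_dedup _ u).mp hu) with rfl | h'
        · omega
        · obtain ⟨q, hq, rfl⟩ := List.mem_map.mp h'
          exact hged q hq
      rw [netA_cons]
      rw [if_pos (by omega : p.1 ≤ u)]
      congr 2
      omega
    · have hlt : lt < p.1 := lt_of_le_of_ne (hge p List.mem_cons_self) (fun h' => h h'.symm)
      rw [show grouped lt c (p :: ts) = [lt, c] :: grouped p.1 (c + dA p.2) ts by
        simp [grouped, h]]
      have hnm : lt ∉ (p :: ts).map (·.1) := by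
        intro hmem
        obtain ⟨q, hq, hq1⟩ := List.mem_map.mp hmem
        rcases List.mem_cons.mp hq with rfl | hq'
        · omega
        · have := hpw.1 q hq'; omega
      rw [dedup_cons_of_not_mem hnm]
      rw [List.map_cons]
      congr 1
      · have h0 : netA (p :: ts) lt = 0 := by
          apply netA_zero
          intro q hq
          rcases List.mem_cons.mp hq with rfl | hq'
          · omega
          · have := hpw.1 q hq'; omega
        rw [h0]; norm_num
      · rw [ih p.1 (c + dA p.2) hpw.2 hpw.1]
        rw [List.map_cons]
        apply List.map_congr_left
        intro u hu
        have hpu : p.1 ≤ u := by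
          rcases List.mem_cons.mp ((PySem.List.mem_dedup _ u).mp hu) with rfl | h'
          · omega
          · obtain ⟨q, hq, rfl⟩ := List.mem_map.mp h'
            exact hpw.1 q hq
        rw [netA_cons, if_pos hpu]
        congr 2
        omega

-- B-side characterisation ----------------------------------------------------

lemma B_loop (delta : PySem.Dict Int Int) (vs : List Int) :
    ∀ (ret : List (List Int)) (c : Int),
      (vs.foldl (fun (s : List (List Int) × Int) (v : Int) =>
        (s.1 ++ [[v, s.2 + delta.getD v 0]], s.2 + delta.getD v 0)) (ret, c)).1
      = ret ++ scanOut (fun v => delta.getD v 0) vs c := by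
  induction vs with
  | nil => intro ret c; simp [scanOut]
  | cons v vs ih =>
    intro ret c
    simp only [List.foldl_cons, scanOut]
    rw [ih]
    simp

/-- the prefix-`≤ u` weight of `vs` under `D`. -/
def SLE (D : Int → Int) (vs : List Int) (u : Int) : Int :=
  (vs.map (fun w => if w ≤ u then D w else 0)).sum

lemma SLE_cons (D : Int → Int) (v : Int) (vs : List Int) (u : Int) :
    SLE D (v :: vs) u = (if v ≤ u then D v else 0) + SLE D vs u := by
  simp [SLE]

lemma SLE_zero {D : Int → Int} {vs : List Int} {u : Int} (h : ∀ w ∈ vs, ¬ w ≤ u) :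
    SLE D vs u = 0 := by
  apply List.sum_eq_zero
  intro x hx
  obtain ⟨w, hw, rfl⟩ := List.mem_map.mp hx
  simp [h w hw]

lemma SLE_congr {D D' : Int → Int} {vs : List Int} {u : Int}
    (h : ∀ w ∈ vs, D w = D' w) : SLE D vs u = SLE D' vs u := by
  unfold SLE
  apply congrArg
  apply List.map_congr_left
  intro w hw
  rw [h w hw]

lemma scanOut_eq (D : Int → Int) (vs : List Int) :
    ∀ c : Int, vs.Pairwise (· < ·) →
      scanOut D vs c = vs.map (fun u => [u, c + SLE D vs u]) := by
  induction vs with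
  | nil => intro c _; simp [scanOut]
  | cons v vs ih =>
    intro c hpw
    rw [List.pairwise_cons] at hpw
    simp only [scanOut, List.map_cons]
    congr 1
    · have h0 : SLE D vs v = 0 := SLE_zero (fun w hw => by have := hpw.1 w hw; omega)
      rw [SLE_cons, if_pos (le_refl v), h0]
      norm_num
    · rw [ih (c + D v) hpw.2]
      apply List.map_congr_left
      intro u hu
      have hvu : v ≤ u := le_of_lt (hpw.1 u hu)
      rw [SLE_cons, if_pos hvu]
      congr 2
      ring

lemma sum_single (vals : List Int) :
    ∀ (a k u : Int), vals.Nodup → a ∈ vals →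
      (vals.map (fun w => if w ≤ u then (if a = w then k else 0) else 0)).sum
        = if a ≤ u then k else 0 := by
  induction vals with
  | nil => intro a k u _ ha; cases ha
  | cons v vals ih =>
    intro a k u hnd ha
    rw [List.nodup_cons] at hnd
    simp only [List.map_cons, List.sum_cons]
    by_cases hav : a = v
    · subst hav
      have h0 : (vals.map (fun w => if w ≤ u then (if a = w then k else 0) else 0)).sum = 0 := by
        apply List.sum_eq_zero
        intro x hx
        obtain ⟨w, hw, rfl⟩ := List.mem_map.mp hx
        have : a ≠ w := fun h => hnd.1 (h ▸ hw)
        simp [this]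
      rw [h0]
      simp
    · have ha' : a ∈ vals := by
        rcases List.mem_cons.mp ha with rfl | h'
        · exact absurd rfl hav
        · exact h'
      rw [ih a k u hnd.2 ha']
      have : (if v ≤ u then (if a = v then k else 0) else 0) = 0 := by
        simp [hav]
      rw [this]
      ring

lemma dlt_cons (p : Int × Int) (bs : List (Int × Int)) (v : Int) :
    dlt (p :: bs) v = (if p.1 = v then p.2 else 0) + dlt bs v := by
  simp [dlt]

lemma netLE_cons (p : Int × Int) (bs : List (Int × Int)) (v : Int) :
    netLE (p :: bs) v = (if p.1 ≤ v then p.2 else 0) + netLE bs v := by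
  simp [netLE]

lemma SLE_dlt (vals : List Int) (hnd : vals.Nodup) :
    ∀ (bs : List (Int × Int)), (∀ p ∈ bs, p.1 ∈ vals) → ∀ u : Int,
      SLE (fun w => dlt bs w) vals u = netLE bs u := by
  intro bs
  induction bs with
  | nil =>
    intro _ u
    simp [SLE, dlt, netLE]
  | cons p bs ih =>
    intro hmem u
    have hmem' : ∀ q ∈ bs, q.1 ∈ vals := fun q hq => hmem q (List.mem_cons_of_mem _ hq)
    have step : SLE (fun w => dlt (p :: bs) w) vals u
        = (vals.map (fun w => if w ≤ u then (if p.1 = w then p.2 else 0) else 0)).sum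
          + SLE (fun w => dlt bs w) vals u := by
      unfold SLE
      rw [show (vals.map (fun w => if w ≤ u then dlt (p :: bs) w else 0))
            = vals.map (fun w =>
                (if w ≤ u then (if p.1 = w then p.2 else 0) else 0)
                + (if w ≤ u then dlt bs w else 0)) from
        List.map_congr_left (fun w _ => by rw [dlt_cons]; split <;> simp)]
      exact PySem.List.sum_map_add_int vals _ _
    rw [step, ih hmem' u, netLE_cons,
        sum_single vals p.1 p.2 u hnd (hmem p List.mem_cons_self)]

-- bridge lemmas --------------------------------------------------------------

lemma getD_delta (l : List (Int × Int)) :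
    ∀ (d : PySem.Dict Int Int) (v : Int),
      (l.foldl (fun d p => d.insert p.1 (d.getD p.1 0 + p.2)) d).getD v 0
        = d.getD v 0 + dlt l v := by
  induction l with
  | nil => intro d v; simp [dlt]
  | cons p l ih =>
    intro d v
    simp only [List.foldl_cons]
    rw [ih, dlt_cons]
    rw [PySem.Dict.getD_insert]
    by_cases h : p.1 = v
    · rw [if_pos h.symm, if_pos h, h]; ring
    · rw [if_neg (fun h' => h h'.symm), if_neg h]; ring

lemma netA_perm {ts ts' : List (Int × Int)} (h : ts.Perm ts') (u : Int) :
    netA ts u = netA ts' u :=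
  (h.map _).sum_eq

lemma netLE_map_dA (ts : List (Int × Int)) (u : Int) :
    netLE (ts.map (fun p => (p.1, dA p.2))) u = netA ts u := by
  simp [netLE, netA, List.map_map]
  rfl

lemma lexLE_fst_le {p q : Int × Int} (h : lexLE p q) : p.1 ≤ q.1 := by
  simp [lexLE] at h; omega

lemma pySwap_le (r : List Int) (h : 2 ≤ r.length) :
    PySem.List.pyGetD (pySwap r) 0 0 ≤ PySem.List.pyGetD (pySwap r) 1 0 := by
  unfold pySwap
  split
  · next hgt =>
    have h0 : 0 < r.length := by omega
    have h1 : 1 < r.length := by omega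
    simp only [PySem.List.pyGetD_ofNat'] at hgt ⊢
    simp [List.getD, h0, h1] at hgt ⊢
    omega
  · next hle => omega

lemma head_mode_zero (rs : List (List Int))
    (hswap : ∀ r ∈ rs, PySem.List.pyGetD r 0 0 ≤ PySem.List.pyGetD r 1 0)
    (t0 m0 : Int) (rest : List (Int × Int))
    (hts : PySem.List.sorted2
      (rs.flatMap (fun r => [(PySem.List.pyGetD r 0 0, (0 : Int)), (PySem.List.pyGetD r 1 0, (1 : Int))]))
      (·.1) (·.2) false = (t0, m0) :: rest) : m0 = 0 := by
  have hpw := sorted2_pairwise_lex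
    (rs.flatMap (fun r => [(PySem.List.pyGetD r 0 0, (0 : Int)), (PySem.List.pyGetD r 1 0, (1 : Int))]))
  rw [hts] at hpw
  have hperm := PySem.List.sorted2_perm
    (rs.flatMap (fun r => [(PySem.List.pyGetD r 0 0, (0 : Int)), (PySem.List.pyGetD r 1 0, (1 : Int))]))
    (·.1) (·.2) false
  rw [hts] at hperm
  have hmem0 : (t0, m0) ∈ rs.flatMap
      (fun r => [(PySem.List.pyGetD r 0 0, (0 : Int)), (PySem.List.pyGetD r 1 0, (1 : Int))]) :=
    hperm.subset List.mem_cons_self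
  obtain ⟨r, hrmem, hcase⟩ := List.mem_flatMap.mp hmem0
  rcases List.mem_cons.mp hcase with h1 | h1
  · exact (Prod.mk.injEq _ _ _ _ ▸ h1).2.symm ▸ rfl
  · have h1' : (t0, m0) = (PySem.List.pyGetD r 1 0, (1 : Int)) := by simpa using h1
    have ht0 : t0 = PySem.List.pyGetD r 1 0 := congrArg Prod.fst h1'
    have hm0 : m0 = 1 := congrArg Prod.snd h1'
    have hq : (PySem.List.pyGetD r 0 0, (0 : Int)) ∈ rs.flatMap
        (fun r => [(PySem.List.pyGetD r 0 0, (0 : Int)), (PySem.List.pyGetD r 1 0, (1 : Int))]) :=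
      List.mem_flatMap.mpr ⟨r, hrmem, by simp⟩
    have hq' := hperm.symm.subset hq
    rcases List.mem_cons.mp hq' with heq | hmemr
    · have := congrArg Prod.snd heq
      simp at this
      omega
    · have hlex := (List.pairwise_cons.mp hpw).1 _ hmemr
      have hsw := hswap r hrmem
      simp [lexLE] at hlex
      omega

-- ===== VERDICT (by name: the statement is the Claim_ definition above) =====
theorem range_concurrency_spec : Claim_equal_range_concurrency := by
  intro ranges hdom hpre
  unfold Spec_range_concurrency
  by_cases hr : ranges = []
  · simp [range_concurrency, range_concurrency_alt, hr]
  · have hrs : ranges.map pySwap ≠ [] := by simpa using hr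
    have hswap : ∀ r ∈ ranges.map pySwap,
        PySem.List.pyGetD r 0 0 ≤ PySem.List.pyGetD r 1 0 := by
      intro r hmem
      obtain ⟨r0, h0, rfl⟩ := List.mem_map.mp hmem
      exact pySwap_le r0 (hpre r0 h0).1
    set rs := ranges.map pySwap with hrsdef
    set tms := rs.flatMap
      (fun r => [(PySem.List.pyGetD r 0 0, (0 : Int)), (PySem.List.pyGetD r 1 0, (1 : Int))]) with htmsdef
    set bnds := rs.flatMap
      (fun r => [(PySem.List.pyGetD r 0 0, (1 : Int)), (PySem.List.pyGetD r 1 0, (-1 : Int))]) with hbndsdef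
    have htms_ne : tms ≠ [] := by
      obtain ⟨r, rs', hrs'⟩ := List.exists_cons_of_ne_nil hrs
      rw [htmsdef, hrs']
      simp
    have hts_ne : PySem.List.sorted2 tms (·.1) (·.2) false ≠ [] := by
      intro hnil
      have hperm := PySem.List.sorted2_perm tms (·.1) (·.2) false
      rw [hnil] at hperm
      exact htms_ne hperm.symm.eq_nil
    obtain ⟨⟨t0, m0⟩, rest, hts⟩ := List.exists_cons_of_ne_nil hts_ne
    have hm0 : m0 = 0 := head_mode_zero rs hswap t0 m0 rest hts
    have hpermts : ((t0, m0) :: rest).Perm tms := by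
      rw [← hts]; exact PySem.List.sorted2_perm tms (·.1) (·.2) false
    have hpwts : ((t0, m0) :: rest).Pairwise lexLE := by
      rw [← hts]; exact sorted2_pairwise_lex tms
    have hpwfst : ((t0, m0) :: rest).Pairwise (fun p q => p.1 ≤ q.1) :=
      hpwts.imp lexLE_fst_le
    have hbm : bnds = tms.map (fun p => (p.1, dA p.2)) := by
      rw [htmsdef, hbndsdef, List.map_flatMap]
      simp [dA]
    -- A-side normal form
    have hA : range_concurrency ranges = [[t0, 0]] ++ grouped t0 1 rest := by
      unfold range_concurrency
      rw [if_neg hr]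
      simp only [PySem.List.foldl_append_eq_flatMap, List.nil_append]
      rw [← hrsdef, ← htmsdef]
      simp only [hts]
      exact A_loop rest [[t0, 0]] t0 1
    -- the dict of deltas
    set delta := bnds.foldl (fun d p => d.insert p.1 (d.getD p.1 0 + p.2)) PySem.Dict.empty with hdeltadef
    have hkeys : delta.keys = PySem.Set.ofList (bnds.map (fun p => p.1)) := by
      rw [hdeltadef,
        PySem.Dict.keys_foldl_insert_key bnds (fun p => p.1) (fun d p => d.getD p.1 0 + p.2) PySem.Dict.empty]
      rfl
    -- the sorted distinct boundary values
    set LA := PySem.List.dedup (t0 :: rest.map (fun p => p.1)) with hLAdef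
    have htsmap : (t0 :: rest.map (fun p => p.1)) = ((t0, m0) :: rest).map (fun p => p.1) := by simp
    have hfstmem : ∀ a : Int, a ∈ LA ↔ a ∈ bnds.map (fun p => p.1) := by
      intro a
      rw [hLAdef, PySem.List.mem_dedup, hbm, List.map_map]
      have hcomp : ((fun p => p.1) ∘ (fun p : Int × Int => (p.1, dA p.2))) = (fun p : Int × Int => p.1) := rfl
      rw [hcomp, htsmap]
      exact ⟨fun h => (hpermts.map (fun p => p.1)).subset h,
             fun h => (hpermts.map (fun p => p.1)).symm.subset h⟩
    have hLAnodup : LA.Nodup := PySem.List.nodup_dedup _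
    have hLAperm : LA.Perm (PySem.Set.ofList (bnds.map (fun p => p.1))) := by
      rw [List.perm_ext_iff_of_nodup hLAnodup (PySem.Set.nodup_ofList _)]
      intro a
      rw [hfstmem a, PySem.Set.mem_ofList]
    have hLAle : LA.Pairwise (· ≤ ·) := by
      have h1 : (t0 :: rest.map (fun p => p.1)).Pairwise (· ≤ ·) := by
        rw [htsmap]
        exact List.pairwise_map.mpr hpwfst
      exact List.Pairwise.sublist (hLAdef ▸ dedup_sublist _) h1
    have hLAlt : LA.Pairwise (· < ·) :=
      (hLAle.and hLAnodup).imp (fun h => lt_of_le_of_ne h.1 h.2)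
    have hvals : PySem.List.sorted delta.keys (fun x => x) false = LA := by
      rw [hkeys]
      exact PySem.List.sorted_eq_of_perm_of_pairwise_lt _ _ _ hLAperm hLAlt
    obtain ⟨tL, hLAeq⟩ := dedup_cons_split t0 (rest.map (fun p => p.1))
    rw [← hLAdef] at hLAeq
    -- B-side normal form
    have hB : range_concurrency_alt ranges
        = [[t0, 0]] ++ scanOut (fun v => delta.getD v 0) LA 0 := by
      unfold range_concurrency_alt
      rw [if_neg hr]
      simp only [PySem.List.foldl_append_eq_flatMap, List.nil_append]
      rw [← hrsdef, ← hbndsdef, ← hdeltadef]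
      simp only [hvals, hLAeq]
      rw [B_loop delta (t0 :: tL) [[t0, 0]] 0, ← hLAeq]
    -- assemble
    rw [hA, hB]
    congr 1
    have hge : ∀ p ∈ rest, t0 ≤ p.1 := (List.pairwise_cons.mp hpwfst).1
    rw [grouped_eq rest t0 1 (List.pairwise_cons.mp hpwfst).2 hge]
    rw [scanOut_eq (fun v => delta.getD v 0) LA 0 hLAlt, ← hLAdef]
    apply List.map_congr_left
    intro u hu
    have ht0u : t0 ≤ u := by
      rcases List.mem_cons.mp ((PySem.List.mem_dedup _ u).mp (hLAdef ▸ hu)) with rfl | h'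
      · omega
      · obtain ⟨q, hq, rfl⟩ := List.mem_map.mp h'
        exact hge q hq
    have hD : ∀ w ∈ LA, (fun v => delta.getD v 0) w = dlt bnds w := by
      intro w _
      show delta.getD w 0 = dlt bnds w
      rw [hdeltadef, getD_delta bnds PySem.Dict.empty w]
      simp [PySem.Dict.getD_empty]
    have hmem : ∀ p ∈ bnds, p.1 ∈ LA := fun p hp =>
      (hfstmem p.1).mpr (List.mem_map_of_mem hp)
    have hchain : SLE (fun v => delta.getD v 0) LA u = 1 + netA rest u := by
      rw [SLE_congr hD, SLE_dlt LA hLAnodup bnds hmem u, hbm, netLE_map_dA,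
        netA_perm hpermts.symm u, netA_cons, if_pos ht0u, hm0]
      simp [dA]
    rw [hchain]
    norm_num
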